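-- pv_equiv track=rewrite | github.com/agusruss0/IAP-1C-2023 | Practica 8/practica8.py | darNuevaLista
-- ===== SOURCE A (Python) =====
-- def darNuevaLista (l: list[int])->list[int]:
--     lista =[]
--     for i in range(0,len(l),1):
--         if i%2 == 0:
--             lista.append(0)
--         else:
--             lista.append(l[i])
--     return lista
-- ===== SOURCE B (Python) =====
-- def darNuevaLista(l: list[int]) -> list[int]:
--     r = list(l)
--     r[::2] = [0] * ((len(l) + 1) // 2)
--     return r
-- ===== Notes on version B (the rewrite author's own statement) =====
-- stated objective: simpler
-- what changed: Replaces the per-index loop with an even/odd parity branch by a copy of the list followed by one bulk strided slice assignment that zeroes all ceil(len(l)/2) even positions at once.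
import Mathlib
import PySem

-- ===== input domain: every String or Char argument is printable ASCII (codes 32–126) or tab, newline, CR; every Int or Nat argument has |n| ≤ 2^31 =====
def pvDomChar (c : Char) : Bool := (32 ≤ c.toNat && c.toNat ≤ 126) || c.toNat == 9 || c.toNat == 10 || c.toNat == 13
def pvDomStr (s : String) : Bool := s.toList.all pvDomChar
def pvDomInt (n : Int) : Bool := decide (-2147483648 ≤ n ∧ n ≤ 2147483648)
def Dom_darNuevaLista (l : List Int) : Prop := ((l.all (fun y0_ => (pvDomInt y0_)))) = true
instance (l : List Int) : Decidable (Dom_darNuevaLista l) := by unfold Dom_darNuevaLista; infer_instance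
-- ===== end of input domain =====

-- B replaces A's per-index loop with a parity branch by a copy plus one bulk
-- strided slice assignment writing a block of zeros; same cost, simpler.

-- ===== PORT A =====
-- for i in range(0, len(l), 1): if i%2==0: append 0 else: append l[i]
-- (l[i] with i always in range; pyGetD's default is only a totality guard)
def darNuevaLista (l : List Int) : List Int :=
  (PySem.List.pyRange 0 (l.length : Int) 1).foldl
    (fun lista i =>
      if i % 2 == 0 then lista ++ [0]
      else lista ++ [PySem.List.pyGetD l i 0]) []

-- ===== PORT B =====
-- hand port of the strided slice assignment r[::2] = repl: walks the copy of l
-- two elements at a time, writing the next replacement at each even position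
-- (exact here: repl has exactly ceil(len l / 2) elements, one per even index)
def pvSetEvery2 (src repl : List Int) : List Int :=
  match src, repl with
  | [], _ => []
  | x :: t, [] => x :: t
  | _ :: t, z :: zs =>
    match t with
    | [] => [z]
    | y :: t' => z :: y :: pvSetEvery2 t' zs

def darNuevaLista_alt (l : List Int) : List Int :=
  pvSetEvery2 l (List.replicate ((l.length + 1) / 2) 0)

-- ===== PRECONDITION & SPEC =====
def Spec_darNuevaLista (l : List Int) (out : List Int) : Prop := out = darNuevaLista_alt l
instance (l : List Int) (out : List Int) : Decidable (Spec_darNuevaLista l out) := by unfold Spec_darNuevaLista; infer_instance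

-- ===== CLAIM (what is proved, stated in full; the proofs are below) =====
def Claim_equal_darNuevaLista : Prop := ∀ (l : List Int), Dom_darNuevaLista l → Spec_darNuevaLista l (darNuevaLista l)

-- ===== LEMMAS AND PROOFS =====

-- A's loop body is 'append (if even then 0 else l[i])', so the fold is a map over the range.
theorem darNuevaLista_eq_map (l : List Int) :
    darNuevaLista l =
      (List.range l.length).map
        (fun k => if k % 2 = 0 then (0 : Int) else l.getD k 0) := by
  unfold darNuevaLista
  have hbody :
      (fun (lista : List Int) (i : Int) =>
        if i % 2 == 0 then lista ++ [0]
        else lista ++ [PySem.List.pyGetD l i 0]) =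
      (fun (lista : List Int) (i : Int) =>
        lista ++ [if i % 2 == 0 then (0 : Int) else PySem.List.pyGetD l i 0]) := by
    funext lista i; split <;> rfl
  rw [hbody, PySem.List.foldl_append_singleton_eq_map, PySem.List.pyRange_one]
  simp only [sub_zero, Int.toNat_natCast, List.map_map, List.nil_append]
  refine List.map_congr_left ?_
  intro k hk
  simp only [Function.comp, zero_add, PySem.List.pyGetD_natCast]
  have h2 : (k : Int) % 2 = ((k % 2 : Nat) : Int) := by push_cast; ring_nf
  rw [h2]
  by_cases h : k % 2 = 0
  · simp [h]
  · have h1 : k % 2 = 1 := by omega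
    simp [h1]

-- the index-based map equals B's two-at-a-time rewrite of the list
theorem map_range_eq_setEvery2 : ∀ (l : List Int),
    (List.range l.length).map
        (fun k => if k % 2 = 0 then (0 : Int) else l.getD k 0) =
      pvSetEvery2 l (List.replicate ((l.length + 1) / 2) 0)
  | [] => by rfl
  | [x] => by simp [pvSetEvery2, List.range_succ]
  | x :: y :: t => by
    have ih := map_range_eq_setEvery2 t
    simp only [List.length_cons]
    rw [List.range_succ_eq_map, List.range_succ_eq_map]
    have hrep : (t.length + 1 + 1 + 1) / 2 = (t.length + 1) / 2 + 1 := by omega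
    rw [hrep, List.replicate_succ]
    simp only [List.map_cons, List.map_map, pvSetEvery2, List.cons.injEq]
    refine ⟨by norm_num, by norm_num, ?_⟩
    rw [← ih]
    refine List.map_congr_left ?_
    intro k hk
    simp only [Function.comp]
    have hmod : (k + 1 + 1) % 2 = k % 2 := by omega
    have hget : (x :: y :: t).getD (k + 1 + 1) 0 = t.getD k 0 := rfl
    rw [hmod, hget]

-- ===== VERDICT (by name: the statement is the Claim_ definition above) =====
theorem darNuevaLista_spec : Claim_equal_darNuevaLista := by
  intro l _
  show darNuevaLista l = darNuevaLista_alt l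
  rw [darNuevaLista_eq_map, darNuevaLista_alt, map_range_eq_setEvery2]
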